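-- pv_equiv track=rewrite | github.com/TurnaboutHero/Vainglory_REVERSE_ENGINEERING | vg/analysis/item_unmapped_hunt.py | role_breakdown
-- ===== SOURCE A (Python) =====
-- from collections import Counter, defaultdict
--
-- def role_breakdown(entries):
--     """Return role percentage string."""
--     role_counts = Counter(e["role"] for e in entries)
--     total = sum(role_counts.values())
--     parts = []
--     for role in ["Captain", "Warrior", "Mage", "Sniper", "Assassin", "?"]:
--         cnt = role_counts.get(role, 0)
--         if cnt:
--             parts.append(f"{role}:{cnt}({cnt*100//total}%)")
--     return ", ".join(parts)
-- ===== SOURCE B (Python) =====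
-- def role_breakdown(entries):
--     """Return role percentage string."""
--     order = ["Captain", "Warrior", "Mage", "Sniper", "Assassin", "?"]
--     rank = {r: i for i, r in enumerate(order)}
--     roles = sorted((e["role"] for e in entries), key=lambda r: rank.get(r, 6))
--     total = len(entries)
--     parts = []
--     while roles:
--         r = roles[0]
--         cnt = 1
--         while cnt < len(roles) and roles[cnt] == r:
--             cnt += 1
--         if r in rank:
--             parts.append(f"{r}:{cnt}({cnt*100//total}%)")
--         roles = roles[cnt:]
--     return ", ".join(parts)
-- ===== Notes on version B (the rewrite author's own statement) =====
-- stated objective: alternative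
-- what changed: Replaces the Counter-then-lookup pass with a sort-and-group algorithm: roles are sorted by a fixed rank key and the output is emitted in one run-length scan over the sorted list, with total = len(entries).
import Mathlib
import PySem

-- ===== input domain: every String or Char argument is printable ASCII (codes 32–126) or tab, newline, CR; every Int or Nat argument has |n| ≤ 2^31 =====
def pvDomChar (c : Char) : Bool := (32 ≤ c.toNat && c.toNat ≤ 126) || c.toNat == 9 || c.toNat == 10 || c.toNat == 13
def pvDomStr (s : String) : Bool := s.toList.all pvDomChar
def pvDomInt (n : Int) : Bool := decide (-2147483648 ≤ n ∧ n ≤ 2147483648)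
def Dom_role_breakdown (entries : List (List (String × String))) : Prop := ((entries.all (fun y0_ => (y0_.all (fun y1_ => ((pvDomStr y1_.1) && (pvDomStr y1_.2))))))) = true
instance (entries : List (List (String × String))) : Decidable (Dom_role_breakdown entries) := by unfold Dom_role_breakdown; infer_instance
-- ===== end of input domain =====

-- B replaces A's Counter with a different algorithm: sort the roles by a fixed rank, then emit run-lengths in one grouping scan.

-- shared helper: e["role"] (Pre_ guarantees the key is present; Python raises KeyError otherwise)
def pyRole (e : List (String × String)) : String :=
  ((PySem.Dict.mk e).get? "role").getD ""

-- shared helper: the f-string f"{role}:{cnt}({cnt*100//total}%)" (both Pythons build it verbatim)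
def fmtPart (total : Int) (role : String) (cnt : Int) : String :=
  role ++ ":" ++ PySem.Int.toStr cnt ++ "(" ++
    PySem.Int.toStr (PySem.Int.floordiv (cnt * 100) total) ++ "%)"

-- ===== PORT A =====
def role_breakdown (entries : List (List (String × String))) : String :=
  let role_counts : PySem.Dict String Int := PySem.Dict.counter (entries.map pyRole)
  let total : Int := role_counts.values.sum
  let parts : List String :=
    ["Captain", "Warrior", "Mage", "Sniper", "Assassin", "?"].foldl
      (fun parts role =>
        let cnt := role_counts.getD role 0
        if cnt ≠ 0 then parts ++ [fmtPart total role cnt] else parts)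
      []
  PySem.Str.join ", " parts

-- ===== PORT B =====
def pvOrder : List String := ["Captain", "Warrior", "Mage", "Sniper", "Assassin", "?"]

-- rank = {r: i for i, r in enumerate(order)}
def pvRank : PySem.Dict String Int :=
  (PySem.List.enumerate pvOrder).foldl (fun d p => d.insert p.2 p.1) (PySem.Dict.mk [])

-- the grouping loop of Source B: measure the leading run of equal roles, emit it if listed, drop it, repeat
def scanRuns (total : Int) : List String → List String
  | [] => []
  | r :: rest =>
      let cnt : Int := ((rest.takeWhile (fun x => x == r)).length : Int) + 1
      (if pvRank.contains r then [fmtPart total r cnt] else []) ++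
        scanRuns total (rest.dropWhile (fun x => x == r))
  termination_by rs => rs.length
  decreasing_by
    have := List.length_dropWhile_le (fun x => x == r) rest
    simp; omega

def role_breakdown_alt (entries : List (List (String × String))) : String :=
  let total : Int := (entries.length : Int)
  let roles := PySem.List.sorted (entries.map pyRole) (fun r => pvRank.getD r 6) false
  PySem.Str.join ", " (scanRuns total roles)

-- ===== PRECONDITION & SPEC =====
-- Pre_ excludes exactly the inputs where some entry lacks the "role" key, on which both Pythons raise KeyError.
def Pre_role_breakdown (entries : List (List (String × String))) : Prop :=
  ∀ e ∈ entries, e.any (fun p => p.1 == "role") = true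
instance (entries : List (List (String × String))) : Decidable (Pre_role_breakdown entries) := by
  unfold Pre_role_breakdown; infer_instance

def pvWitness_role_breakdown : (List (List (String × String))) :=
  [[("role", "Mage")], [("role", "Captain")], [("role", "Mage")]]

def Spec_role_breakdown (entries : List (List (String × String))) (out : String) : Prop := out = role_breakdown_alt entries
instance (entries : List (List (String × String))) (out : String) : Decidable (Spec_role_breakdown entries out) := by unfold Spec_role_breakdown; infer_instance

-- ===== CLAIM (what is proved, stated in full; the proofs are below) =====
def Claim_equal_role_breakdown : Prop := ∀ (entries : List (List (String × String))), Dom_role_breakdown entries → Pre_role_breakdown entries → Spec_role_breakdown entries (role_breakdown entries)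

-- ===== LEMMAS AND PROOFS =====

-- B's sort key, named for the proofs
def pvKey (r : String) : Int := pvRank.getD r 6

theorem pvRank_eq : pvRank = PySem.Dict.mk
    [("Captain", 0), ("Warrior", 1), ("Mage", 2), ("Sniper", 3), ("Assassin", 4), ("?", 5)] := by
  rfl

theorem key_eq (r : String) : pvKey r =
    if r = "Captain" then 0 else if r = "Warrior" then 1 else if r = "Mage" then 2
    else if r = "Sniper" then 3 else if r = "Assassin" then 4 else if r = "?" then 5 else 6 := by
  by_cases h0 : r = "Captain"
  · subst h0; rfl
  by_cases h1 : r = "Warrior"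
  · subst h1; rfl
  by_cases h2 : r = "Mage"
  · subst h2; rfl
  by_cases h3 : r = "Sniper"
  · subst h3; rfl
  by_cases h4 : r = "Assassin"
  · subst h4; rfl
  by_cases h5 : r = "?"
  · subst h5; rfl
  have f0 : ("Captain" == r) = false := beq_eq_false_iff_ne.mpr (fun e => h0 e.symm)
  have f1 : ("Warrior" == r) = false := beq_eq_false_iff_ne.mpr (fun e => h1 e.symm)
  have f2 : ("Mage" == r) = false := beq_eq_false_iff_ne.mpr (fun e => h2 e.symm)
  have f3 : ("Sniper" == r) = false := beq_eq_false_iff_ne.mpr (fun e => h3 e.symm)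
  have f4 : ("Assassin" == r) = false := beq_eq_false_iff_ne.mpr (fun e => h4 e.symm)
  have f5 : ("?" == r) = false := beq_eq_false_iff_ne.mpr (fun e => h5 e.symm)
  simp only [pvKey, pvRank_eq, PySem.Dict.getD, PySem.Dict.get?, List.find?, f0, f1, f2, f3, f4,
    f5, Option.map_none, Option.getD_none]
  rw [if_neg h0, if_neg h1, if_neg h2, if_neg h3, if_neg h4, if_neg h5]

theorem key_bound (r : String) : 0 ≤ pvKey r ∧ pvKey r ≤ 6 := by
  rw [key_eq]; split_ifs <;> omega

theorem contains_of_key (x : String) (h : pvKey x = 6) : pvRank.contains x = false := by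
  rw [key_eq] at h
  split_ifs at h with h0 h1 h2 h3 h4 h5 <;> try exact absurd h (by decide)
  have f0 : ("Captain" == x) = false := beq_eq_false_iff_ne.mpr (fun e => h0 e.symm)
  have f1 : ("Warrior" == x) = false := beq_eq_false_iff_ne.mpr (fun e => h1 e.symm)
  have f2 : ("Mage" == x) = false := beq_eq_false_iff_ne.mpr (fun e => h2 e.symm)
  have f3 : ("Sniper" == x) = false := beq_eq_false_iff_ne.mpr (fun e => h3 e.symm)
  have f4 : ("Assassin" == x) = false := beq_eq_false_iff_ne.mpr (fun e => h4 e.symm)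
  have f5 : ("?" == x) = false := beq_eq_false_iff_ne.mpr (fun e => h5 e.symm)
  simp only [PySem.Dict.contains, pvRank_eq, List.any_cons, List.any_nil, f0, f1, f2, f3, f4, f5]
  rfl

theorem ne_of_key_six (x v : String) (hv : pvKey v ≠ 6) (h : pvKey x = 6) : x ≠ v := by
  intro he; rw [he] at h; exact hv h

-- the stable order sorted(roles, key) produces: the rank-0 block, then rank-1, …, then rank-6
def pvBlocks (xs : List String) : List String :=
  (List.range 7).flatMap (fun (i : Nat) => xs.filter (fun r => pvKey r == (i : Int)))

theorem pvFlatMapCongr {f g : Nat → List String} (l : List Nat) (h : ∀ a ∈ l, f a = g a) :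
    l.flatMap f = l.flatMap g := by
  induction l with
  | nil => rfl
  | cons a l ih => simp_all [List.flatMap_cons]

theorem insertBy_mid (x : String) (A B : List String)
    (hA : ∀ a ∈ A, ¬ pvKey x < pvKey a) (hB : ∀ b ∈ B, pvKey x < pvKey b) :
    PySem.List.insertBy (fun a b => decide (pvKey a < pvKey b)) x (A ++ B) = A ++ x :: B := by
  induction A with
  | nil =>
    cases B with
    | nil => rfl
    | cons b bs => simp [PySem.List.insertBy, hB b (List.mem_cons_self)]
  | cons a as ih =>
    simp only [List.cons_append, PySem.List.insertBy]
    rw [if_neg (by simpa using hA a List.mem_cons_self)]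
    rw [ih (fun a ha => hA a (List.mem_cons_of_mem _ ha))]

theorem insertBy_blocks (S : List String) (x : String) :
    PySem.List.insertBy (fun a b => decide (pvKey a < pvKey b)) x (pvBlocks S) = pvBlocks (S ++ [x]) := by
  obtain ⟨hk0, hk6⟩ := key_bound x
  have hkey : pvKey x = ((pvKey x).toNat : Int) := by omega
  set k : Nat := (pvKey x).toNat with hkdef
  have hk6' : k ≤ 6 := by omega
  have h7 : (7 : Nat) = (k + 1) + (6 - k) := by omega
  have hblocks : ∀ T : List String, pvBlocks T =
      ((List.range (k + 1)).flatMap fun (i : Nat) => T.filter (fun r => pvKey r == (i : Int))) ++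
      ((List.range (6 - k)).flatMap fun (j : Nat) =>
        T.filter (fun r => pvKey r == (((k + 1) + j : Nat) : Int))) := by
    intro T
    rw [pvBlocks, h7, List.range_add, List.flatMap_append, List.flatMap_map]
  have hfx : ∀ i : Nat, i ≠ k →
      (S ++ [x]).filter (fun r => pvKey r == (i : Int)) = S.filter (fun r => pvKey r == (i : Int)) := by
    intro i hi
    rw [List.filter_append, List.filter_singleton]
    have : (pvKey x == (i : Int)) = false := by rw [hkey]; simp; omega
    simp [this]
  have hfk : (S ++ [x]).filter (fun r => pvKey r == (k : Int)) =
      S.filter (fun r => pvKey r == (k : Int)) ++ [x] := by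
    rw [List.filter_append, List.filter_singleton]
    have : (pvKey x == (k : Int)) = true := by rw [hkey]; simp
    simp [this]
  rw [hblocks S, hblocks (S ++ [x])]
  rw [insertBy_mid]
  · have hhigh : ((List.range (6 - k)).flatMap fun (j : Nat) =>
        (S ++ [x]).filter (fun r => pvKey r == (((k + 1) + j : Nat) : Int)))
        = (List.range (6 - k)).flatMap fun (j : Nat) =>
          S.filter (fun r => pvKey r == (((k + 1) + j : Nat) : Int)) := by
      apply pvFlatMapCongr
      intro j _
      exact hfx ((k + 1) + j) (by omega)
    have hlow : ((List.range (k + 1)).flatMap fun (i : Nat) =>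
        (S ++ [x]).filter (fun r => pvKey r == (i : Int)))
        = ((List.range k).flatMap fun (i : Nat) => S.filter (fun r => pvKey r == (i : Int))) ++
          (S.filter (fun r => pvKey r == (k : Int)) ++ [x]) := by
      rw [List.range_succ, List.flatMap_append, List.flatMap_singleton, hfk]
      congr 1
      apply pvFlatMapCongr
      intro i hi
      exact hfx i (by simp at hi; omega)
    rw [hhigh, hlow, List.range_succ, List.flatMap_append, List.flatMap_singleton]
    simp [List.append_assoc]
  · intro a ha
    simp only [List.mem_flatMap, List.mem_range, List.mem_filter] at ha
    obtain ⟨i, hi, _, hkey_a⟩ := ha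
    have : pvKey a = (i : Int) := by simpa using hkey_a
    rw [hkey]
    omega
  · intro b hb
    simp only [List.mem_flatMap, List.mem_range, List.mem_filter] at hb
    obtain ⟨j, hj, _, hkey_b⟩ := hb
    have : pvKey b = (((k + 1) + j : Nat) : Int) := by simpa using hkey_b
    rw [hkey, this]
    push_cast
    omega

theorem sorted_eq_blocks (xs : List String) :
    PySem.List.sorted xs pvKey false = pvBlocks xs := by
  induction xs using List.reverseRecOn with
  | nil => rfl
  | append_singleton S x ih =>
    rw [PySem.List.sorted_eq_foldl_insertBy, List.foldl_append, List.foldl_cons, List.foldl_nil,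
      ← PySem.List.sorted_eq_foldl_insertBy, ih]
    exact insertBy_blocks S x

theorem takeWhile_eq_nil_of (v : String) (tail : List String) (ht : ∀ x ∈ tail, x ≠ v) :
    tail.takeWhile (fun x => x == v) = [] := by
  cases tail with
  | nil => rfl
  | cons y ys =>
    have f : (y == v) = false := beq_eq_false_iff_ne.mpr (ht y List.mem_cons_self)
    simp [f]

theorem dropWhile_eq_self_of (v : String) (tail : List String) (ht : ∀ x ∈ tail, x ≠ v) :
    tail.dropWhile (fun x => x == v) = tail := by
  cases tail with
  | nil => rfl
  | cons y ys =>
    have f : (y == v) = false := beq_eq_false_iff_ne.mpr (ht y List.mem_cons_self)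
    simp [f]

theorem scan_run (total : Int) (v : String) (c : Nat) (tail : List String)
    (hv : pvRank.contains v = true) (ht : ∀ x ∈ tail, x ≠ v) :
    scanRuns total (List.replicate c v ++ tail) =
      (if ((c : Int)) ≠ 0 then [fmtPart total v (c : Int)] else []) ++ scanRuns total tail := by
  cases c with
  | zero => simp
  | succ n =>
    rw [List.replicate_succ, List.cons_append, scanRuns.eq_2]
    have htw : (List.replicate n v ++ tail).takeWhile (fun x => x == v) = List.replicate n v := by
      rw [List.takeWhile_append, List.takeWhile_replicate]
      simp [takeWhile_eq_nil_of v tail ht]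
    have hdw : (List.replicate n v ++ tail).dropWhile (fun x => x == v) = tail := by
      rw [List.dropWhile_append, List.dropWhile_replicate]
      simp [dropWhile_eq_self_of v tail ht]
    rw [htw, hdw, hv]
    simp only [List.length_replicate, if_true]
    have : ((n : Int) + 1) = ((n + 1 : Nat) : Int) := by push_cast; ring
    rw [this]
    have hne : (((n + 1 : Nat) : Int)) ≠ 0 := by push_cast; omega
    rw [if_pos hne]

theorem scan_junk (total : Int) (tail : List String)
    (h : ∀ x ∈ tail, pvRank.contains x = false) : scanRuns total tail = [] := by
  fun_induction scanRuns total tail with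
  | case1 => rfl
  | case2 r rest cnt ih =>
    rw [h r List.mem_cons_self]
    simp only [Bool.false_eq_true, if_false, List.nil_append]
    exact ih (fun x hx => h x (List.mem_cons_of_mem _ ((List.dropWhile_sublist _).subset hx)))

theorem foldl_if_eq_flatMap (g : String → Int) (f : String → String) (l : List String)
    (acc : List String) :
    l.foldl (fun parts role => if g role ≠ 0 then parts ++ [f role] else parts) acc
      = acc ++ l.flatMap (fun role => if g role ≠ 0 then [f role] else []) := by
  induction l generalizing acc with
  | nil => simp
  | cons a l ih => simp only [List.foldl_cons, List.flatMap_cons, ih]; split_ifs <;> simp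

theorem filter_key_eq (roles : List String) (v : String) (i : Nat) (hv : pvKey v = (i : Int))
    (huniq : ∀ x, pvKey x = (i : Int) → x = v) :
    roles.filter (fun r => pvKey r == (i : Int)) = List.replicate (roles.count v) v := by
  rw [List.filter_congr (fun x _ => ?_), List.filter_beq]
  by_cases h : x = v
  · subst h; simp [hv]
  · have hne : pvKey x ≠ (i : Int) := fun he => h (huniq x he)
    simp [hne, h]

-- the grouping scan over the rank-sorted roles produces exactly A's parts list
theorem main_eq (roles : List String) (total : Int) :
    scanRuns total (pvBlocks roles) =
      pvOrder.flatMap (fun role =>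
        if ((roles.count role : Int)) ≠ 0 then [fmtPart total role ((roles.count role : Int))] else []) := by
  have hmem6 : ∀ x ∈ roles.filter (fun r => pvKey r == ((6 : Nat) : Int)), pvKey x = 6 := by
    intro x hx
    simp only [List.mem_filter, beq_iff_eq] at hx
    exact_mod_cast hx.2
  have hdec : pvBlocks roles =
      List.replicate (roles.count "Captain") "Captain" ++
      (List.replicate (roles.count "Warrior") "Warrior" ++
      (List.replicate (roles.count "Mage") "Mage" ++
      (List.replicate (roles.count "Sniper") "Sniper" ++
      (List.replicate (roles.count "Assassin") "Assassin" ++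
      (List.replicate (roles.count "?") "?" ++
      roles.filter (fun r => pvKey r == ((6 : Nat) : Int))))))) := by
    have h7 : List.range 7 = [0, 1, 2, 3, 4, 5, 6] := rfl
    rw [pvBlocks, h7]
    simp only [List.flatMap_cons, List.flatMap_nil, List.append_nil]
    rw [filter_key_eq roles "Captain" 0 (by decide)
        (fun x he => by rw [key_eq] at he; split_ifs at he <;> first | assumption | exact absurd he (by decide)),
      filter_key_eq roles "Warrior" 1 (by decide)
        (fun x he => by rw [key_eq] at he; split_ifs at he <;> first | assumption | exact absurd he (by decide)),
      filter_key_eq roles "Mage" 2 (by decide)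
        (fun x he => by rw [key_eq] at he; split_ifs at he <;> first | assumption | exact absurd he (by decide)),
      filter_key_eq roles "Sniper" 3 (by decide)
        (fun x he => by rw [key_eq] at he; split_ifs at he <;> first | assumption | exact absurd he (by decide)),
      filter_key_eq roles "Assassin" 4 (by decide)
        (fun x he => by rw [key_eq] at he; split_ifs at he <;> first | assumption | exact absurd he (by decide)),
      filter_key_eq roles "?" 5 (by decide)
        (fun x he => by rw [key_eq] at he; split_ifs at he <;> first | assumption | exact absurd he (by decide))]
  rw [hdec]
  rw [scan_run total "Captain" (roles.count "Captain") _ (by rfl) ?h0]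
  rw [scan_run total "Warrior" (roles.count "Warrior") _ (by rfl) ?h1]
  rw [scan_run total "Mage" (roles.count "Mage") _ (by rfl) ?h2]
  rw [scan_run total "Sniper" (roles.count "Sniper") _ (by rfl) ?h3]
  rw [scan_run total "Assassin" (roles.count "Assassin") _ (by rfl) ?h4]
  rw [scan_run total "?" (roles.count "?") _ (by rfl) ?h5]
  rw [scan_junk total _ (fun x hx => contains_of_key x (hmem6 x hx))]
  · simp only [pvOrder, List.flatMap_cons, List.flatMap_nil, List.append_nil]
  case h0 =>
    intro x hx
    simp only [List.mem_append, List.mem_replicate] at hx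
    rcases hx with ⟨_, rfl⟩ | ⟨_, rfl⟩ | ⟨_, rfl⟩ | ⟨_, rfl⟩ | ⟨_, rfl⟩ | h6
    · decide
    · decide
    · decide
    · decide
    · decide
    · exact ne_of_key_six x "Captain" (by decide) (hmem6 x h6)
  case h1 =>
    intro x hx
    simp only [List.mem_append, List.mem_replicate] at hx
    rcases hx with ⟨_, rfl⟩ | ⟨_, rfl⟩ | ⟨_, rfl⟩ | ⟨_, rfl⟩ | h6
    · decide
    · decide
    · decide
    · decide
    · exact ne_of_key_six x "Warrior" (by decide) (hmem6 x h6)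
  case h2 =>
    intro x hx
    simp only [List.mem_append, List.mem_replicate] at hx
    rcases hx with ⟨_, rfl⟩ | ⟨_, rfl⟩ | ⟨_, rfl⟩ | h6
    · decide
    · decide
    · decide
    · exact ne_of_key_six x "Mage" (by decide) (hmem6 x h6)
  case h3 =>
    intro x hx
    simp only [List.mem_append, List.mem_replicate] at hx
    rcases hx with ⟨_, rfl⟩ | ⟨_, rfl⟩ | h6
    · decide
    · decide
    · exact ne_of_key_six x "Sniper" (by decide) (hmem6 x h6)
  case h4 =>
    intro x hx
    simp only [List.mem_append, List.mem_replicate] at hx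
    rcases hx with ⟨_, rfl⟩ | h6
    · decide
    · exact ne_of_key_six x "Assassin" (by decide) (hmem6 x h6)
  case h5 =>
    intro x hx
    exact ne_of_key_six x "?" (by decide) (hmem6 x hx)

-- The sum of the Counter's values is the number of entries.
theorem total_eq (entries : List (List (String × String))) :
    (PySem.Dict.counter (entries.map pyRole)).values.sum = (entries.length : Int) := by
  set xs : List String := entries.map pyRole with hxs
  have hvals : (PySem.Dict.counter xs).values =
      List.map (fun k => ((List.count k xs : Nat) : Int)) (PySem.Set.ofList xs) := by
    simp [PySem.Dict.values, PySem.Dict.items_counter xs]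
  have hperm : List.Perm (PySem.Set.ofList xs) xs.dedup := by
    rw [List.perm_ext_iff_of_nodup (PySem.Set.nodup_ofList xs) xs.nodup_dedup]
    intro a
    rw [PySem.Set.mem_ofList, List.mem_dedup]
  have hsum : (List.map (fun k => ((List.count k xs : Nat) : Int)) (PySem.Set.ofList xs)).sum =
      (List.map (fun k => ((List.count k xs : Nat) : Int)) xs.dedup).sum :=
    (hperm.map _).sum_eq
  have hlen : (List.map (fun k => (List.count k xs : Nat)) xs.dedup).sum = xs.length :=
    List.sum_map_count_dedup_eq_length xs
  rw [hvals, hsum]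
  have : (List.map (fun k => ((List.count k xs : Nat) : Int)) xs.dedup) =
      List.map (Nat.cast) (List.map (fun k => (List.count k xs : Nat)) xs.dedup) := by
    simp [List.map_map]
  rw [this, ← Nat.cast_list_sum, hlen, hxs, List.length_map]

-- ===== VERDICT (by name: the statement is the Claim_ definition above) =====
theorem role_breakdown_spec : Claim_equal_role_breakdown := by
  intro entries _ _
  unfold Spec_role_breakdown role_breakdown role_breakdown_alt
  simp only [PySem.Dict.getD_counter, total_eq]
  rw [show (fun r => pvRank.getD r 6) = pvKey from rfl, sorted_eq_blocks, main_eq]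
  rw [foldl_if_eq_flatMap (fun role => ((entries.map pyRole).count role : Int))
    (fun role => fmtPart (entries.length : Int) role (((entries.map pyRole).count role : Int)))]
  rfl
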